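-- pv_equiv track=rewrite | github.com/amor0009/BSUIR-CMSaN | third year/5 sem/OKS/lab2/COMPort.py | byte_stuffing
-- ===== SOURCE A (Python) =====
-- def byte_stuffing(data):
--     escape_byte = '['
--     stuffed_data = ""
--
--     i = 0
--     while i < len(data):
--         if data[i:i+2] == '@p' and i != 0:
--             stuffed_data += escape_byte + 'p'
--             i += 2
--         elif data[i] == escape_byte:
--             stuffed_data += escape_byte * 2
--             i += 1
--         else:
--             stuffed_data += data[i]
--             i += 1
--
--     return stuffed_data
-- ===== SOURCE B (Python) =====
-- def byte_stuffing(data):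
--     # Escape every escape byte first, then frame-flag sequences; the leading
--     # '@p' (the frame-start flag itself) is exempt, as in the protocol.
--     s = data.replace('[', '[[')
--     if s.startswith('@p'):
--         return '@p' + s[2:].replace('@p', '[p')
--     return s.replace('@p', '[p')
-- ===== Notes on version B (the rewrite author's own statement) =====
-- stated objective: faster
-- what changed: Replaced the manual index-and-slice while loop building the output one character at a time by two whole-string str.replace passes ('[' -> '[[' then '@p' -> '[p'), with a startswith guard for the protocol's exempt leading frame flag.
import Mathlib
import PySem

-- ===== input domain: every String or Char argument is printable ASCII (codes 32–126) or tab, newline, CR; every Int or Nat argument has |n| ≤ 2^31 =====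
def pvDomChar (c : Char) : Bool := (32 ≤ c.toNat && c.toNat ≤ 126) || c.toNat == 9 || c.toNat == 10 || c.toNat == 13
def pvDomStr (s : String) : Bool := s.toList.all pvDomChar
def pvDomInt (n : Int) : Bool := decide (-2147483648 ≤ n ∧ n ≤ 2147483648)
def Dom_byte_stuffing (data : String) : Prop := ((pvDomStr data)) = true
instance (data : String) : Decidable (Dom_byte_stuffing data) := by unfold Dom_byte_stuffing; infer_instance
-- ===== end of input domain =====

-- B replaces A's manual index/slice while loop by two whole-string replace passes; objective: simpler.

-- ===== PORT A =====
-- A's while loop: index i over data, '@p' (when i ≠ 0) advances by 2, otherwise by 1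
def bsGo (l : List Char) (i : Nat) (acc : List Char) : List Char :=
  if h : i < l.length then
    if PySem.List.slice l (some (i : Int)) (some ((i : Int) + 2)) = ['@', 'p'] ∧ i ≠ 0 then
      bsGo l (i + 2) (acc ++ ['[', 'p'])
    else if l[i] = '[' then
      bsGo l (i + 1) (acc ++ ['[', '['])
    else
      bsGo l (i + 1) (acc ++ [l[i]])
  else acc
termination_by l.length - i

def byte_stuffing (data : String) : String :=
  String.ofList (bsGo data.toList 0 [])

-- ===== PORT B =====
def byte_stuffing_alt (data : String) : String :=
  let s := PySem.Str.replace data "[" "[["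
  if PySem.Str.startswith s "@p" then
    "@p" ++ PySem.Str.replace (PySem.Str.slice s (some 2) none) "@p" "[p"
  else
    PySem.Str.replace s "@p" "[p"

-- ===== PRECONDITION & SPEC =====
def Spec_byte_stuffing (data : String) (out : String) : Prop := out = byte_stuffing_alt data
instance (data : String) (out : String) : Decidable (Spec_byte_stuffing data out) := by unfold Spec_byte_stuffing; infer_instance

-- ===== CLAIM (what is proved, stated in full; the proofs are below) =====
def Claim_equal_byte_stuffing : Prop := ∀ (data : String), Dom_byte_stuffing data → Spec_byte_stuffing data (byte_stuffing data)

-- ===== LEMMAS AND PROOFS =====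

-- str.replace('[', '[[') as structural recursion
def repBr : List Char → List Char
  | [] => []
  | c :: t => if c = '[' then '[' :: '[' :: repBr t else c :: repBr t

-- str.replace('@p', '[p') as structural recursion
def repAt (l : List Char) : List Char :=
  match l with
  | [] => []
  | c :: t => if c = '@' ∧ t.head? = some 'p' then '[' :: 'p' :: repAt t.tail else c :: repAt t
termination_by l.length
decreasing_by all_goals (simp [List.length_tail]; try omega)

-- A's scan in the i ≠ 0 regime, as structural recursion on the suffix
def specA (l : List Char) : List Char :=
  match l with
  | [] => []
  | c :: t =>
    if c = '@' ∧ t.head? = some 'p' then '[' :: 'p' :: specA t.tail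
    else if c = '[' then '[' :: '[' :: specA t
    else c :: specA t
termination_by l.length
decreasing_by all_goals (simp [List.length_tail]; try omega)

-- equation helpers
theorem repBr_br (t : List Char) : repBr ('[' :: t) = '[' :: '[' :: repBr t := by
  rw [repBr]; rw [if_pos rfl]
theorem repBr_ne (c : Char) (t : List Char) (h : c ≠ '[') : repBr (c :: t) = c :: repBr t := by
  rw [repBr]; rw [if_neg h]
theorem repAt_at (t : List Char) : repAt ('@' :: 'p' :: t) = '[' :: 'p' :: repAt t := by
  rw [repAt]; rw [if_pos (by simp)]; rfl
theorem repAt_ne (c : Char) (t : List Char) (h : ¬ (c = '@' ∧ t.head? = some 'p')) :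
    repAt (c :: t) = c :: repAt t := by
  rw [repAt]; rw [if_neg h]
theorem specA_at (t : List Char) : specA ('@' :: 'p' :: t) = '[' :: 'p' :: specA t := by
  rw [specA]; rw [if_pos (by simp)]; rfl
theorem specA_br (t : List Char) : specA ('[' :: t) = '[' :: '[' :: specA t := by
  rw [specA]; rw [if_neg (by rintro ⟨h, -⟩; exact absurd h (by decide))]; rw [if_pos rfl]
theorem specA_ne (c : Char) (t : List Char) (h1 : ¬ (c = '@' ∧ t.head? = some 'p'))
    (h2 : c ≠ '[') : specA (c :: t) = c :: specA t := by
  rw [specA]; rw [if_neg h1]; rw [if_neg h2]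

theorem repBr_head? (l : List Char) : (repBr l).head? = l.head? := by
  cases l with
  | nil => rfl
  | cons c t => by_cases hc : c = '[' <;> simp [repBr, hc]

theorem pre_ne (c : Char) (t : List Char) (h : ¬ (c = '@' ∧ t.head? = some 'p')) :
    ¬ (List.isPrefixOf ['@', 'p'] (c :: t) = true) := by
  simp only [List.isPrefixOf, Bool.and_eq_true, beq_iff_eq]
  rintro ⟨h1, h2⟩
  apply h
  refine ⟨h1.symm, ?_⟩
  cases t with
  | nil => simp [List.isPrefixOf] at h2
  | cons e r => simp [List.isPrefixOf] at h2; simp [← h2]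

theorem goBr : ∀ fuel (l acc : List Char), l.length ≤ fuel →
    PySem.Chars.replace.go ['['] ['[','['] fuel l acc = acc.reverse ++ repBr l := by
  intro fuel
  induction fuel with
  | zero => intro l acc h; simp at h; subst h; simp [PySem.Chars.replace.go, repBr]
  | succ f ih =>
    intro l acc h
    cases l with
    | nil => simp [PySem.Chars.replace.go, repBr]
    | cons c t =>
      rw [PySem.Chars.replace.go]
      simp only [List.isPrefixOf, Bool.and_true]
      by_cases hc : c = '['
      · rw [if_pos (by simp [hc])]
        rw [ih _ _ (by simpa using Nat.le_of_succ_le_succ h)]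
        simp [repBr, hc]
      · rw [if_neg (by simp [Ne.symm hc])]
        rw [ih _ _ (by simpa using Nat.le_of_succ_le_succ h)]
        simp [repBr, hc]

theorem replaceBr (l : List Char) : PySem.Chars.replace l ['['] ['[','['] = repBr l := by
  rw [PySem.Chars.replace]
  simp [goBr l.length l [] le_rfl]

theorem goAt : ∀ fuel (l acc : List Char), l.length ≤ fuel →
    PySem.Chars.replace.go ['@','p'] ['[','p'] fuel l acc = acc.reverse ++ repAt l := by
  intro fuel
  induction fuel with
  | zero => intro l acc h; simp at h; subst h; simp [PySem.Chars.replace.go, repAt]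
  | succ f ih =>
    intro l acc h
    cases l with
    | nil => simp [PySem.Chars.replace.go, repAt]
    | cons c t =>
      rw [PySem.Chars.replace.go]
      simp only [List.isPrefixOf]
      by_cases hc : c = '@' ∧ t.head? = some 'p'
      · obtain ⟨hc1, hc2⟩ := hc
        cases t with
        | nil => simp at hc2
        | cons d t' =>
          simp at hc2
          subst hc1; subst hc2
          rw [if_pos (by simp [List.isPrefixOf])]
          rw [ih _ _ (by simp at h ⊢; omega)]
          rw [repAt_at]
          simp
      · have hfalse : ('@' == c && List.isPrefixOf ['p'] t) = false := by
          by_cases h1 : c = '@'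
          · subst h1
            cases t with
            | nil => simp [List.isPrefixOf]
            | cons d t' =>
              simp only [List.isPrefixOf, Bool.true_and, beq_self_eq_true, Bool.and_true]
              simp only [beq_eq_false_iff_ne, ne_eq]
              intro h2
              exact hc ⟨rfl, by simp [← h2]⟩
          · simp [Ne.symm h1]
        rw [if_neg (by rw [hfalse]; simp)]
        rw [ih _ _ (by simpa using Nat.le_of_succ_le_succ h)]
        rw [repAt_ne c t hc]
        simp

theorem replaceAt (l : List Char) : PySem.Chars.replace l ['@','p'] ['[','p'] = repAt l := by
  rw [PySem.Chars.replace]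
  simp [goAt l.length l [] le_rfl]

-- the two replace passes compose to A's one-pass scan (non-initial regime)
theorem comp (l : List Char) : repAt (repBr l) = specA l := by
  induction l using specA.induct with
  | case1 => simp [repBr, repAt, specA]
  | case2 c t hc ih =>
    obtain ⟨hc1, hc2⟩ := hc
    cases t with
    | nil => simp at hc2
    | cons d t' =>
      simp at hc2
      subst hc1; subst hc2
      rw [repBr_ne _ _ (by decide), repBr_ne _ _ (by decide)]
      rw [repAt_at, specA_at]
      simpa using ih
  | case3 t hc ih =>
    rw [repBr_br]
    rw [repAt_ne _ _ (by simp), repAt_ne _ _ (by simp)]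
    rw [specA_br]
    rw [ih]
  | case4 c t hc1 hc2 ih =>
    rw [repBr_ne _ _ hc2]
    rw [repAt_ne _ _ (by rw [repBr_head?]; exact hc1)]
    rw [specA_ne _ _ hc1 hc2]
    rw [ih]

theorem slice_two (l : List Char) (i : Nat) :
    PySem.List.slice l (some (i : Int)) (some ((i : Int) + 2)) = (l.drop i).take 2 := by
  have := PySem.List.slice_natCast_add (xs := l) (j := i) (n := 2)
  push_cast at this ⊢
  exact this

theorem bsGo_spec (l : List Char) : ∀ n i acc, i ≠ 0 → i ≤ l.length → l.length - i ≤ n →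
    bsGo l i acc = acc ++ specA (l.drop i) := by
  intro n
  induction n with
  | zero =>
    intro i acc hi hle hn
    have hieq : i = l.length := by omega
    rw [bsGo]
    rw [dif_neg (by omega)]
    simp [hieq, specA]
  | succ n ih =>
    intro i acc hi hle hn
    by_cases hlt : i < l.length
    · rw [bsGo]
      rw [dif_pos hlt]
      have hdl : l.drop i = l[i] :: l.drop (i+1) := List.drop_eq_getElem_cons hlt
      rw [slice_two]
      by_cases hat : l[i] = '@' ∧ (l.drop (i+1)).head? = some 'p'
      · obtain ⟨ha, hp⟩ := hat
        cases hd1 : l.drop (i+1) with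
        | nil => rw [hd1] at hp; simp at hp
        | cons d r2 =>
          rw [hd1] at hp; simp at hp
          subst hp
          have hd2 : l.drop (i+2) = r2 := by
            have h : l.drop (i+2) = (l.drop (i+1)).drop 1 := by
              rw [List.drop_drop]
            rw [h, hd1]
            rfl
          rw [if_pos ⟨by rw [hdl, hd1, ha]; rfl, hi⟩]
          have hlen2 : i + 2 ≤ l.length := by
            have h := List.length_drop (l := l) (i := i+1)
            rw [hd1] at h
            simp at h
            omega
          rw [ih (i+2) _ (by omega) hlen2 (by omega)]
          rw [hdl, hd1, ha, specA_at, hd2]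
          simp
      · have hne : ¬ ((l.drop i).take 2 = ['@','p'] ∧ i ≠ 0) := by
          rintro ⟨htk, -⟩
          rw [hdl] at htk
          cases hd1 : l.drop (i+1) with
          | nil => rw [hd1] at htk; simp at htk
          | cons d r2 =>
            rw [hd1] at htk
            simp at htk
            exact hat ⟨htk.1, by rw [hd1, htk.2]; rfl⟩
        rw [if_neg hne]
        have hrec : ∀ x, bsGo l (i+1) (acc ++ x) = acc ++ x ++ specA (l.drop (i+1)) :=
          fun x => ih (i+1) (acc ++ x) (by omega) (by omega) (by omega)
        by_cases hbr : l[i] = '['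
        · rw [if_pos hbr, hrec]
          rw [hdl, hbr, specA_br]
          simp
        · rw [if_neg hbr, hrec]
          rw [hdl, specA_ne _ _ hat hbr]
          simp
    · rw [bsGo]
      rw [dif_neg hlt]
      have : i = l.length := by omega
      simp [this, specA]

-- A's full loop (position 0 exempt from the '@p' case) equals B's branch structure, on lists
theorem main_list (l : List Char) :
    bsGo l 0 [] =
      (if List.isPrefixOf ['@','p'] (repBr l) then '@' :: 'p' :: repAt ((repBr l).drop 2)
       else repAt (repBr l)) := by
  cases l with
  | nil => rw [bsGo]; simp [repBr, repAt]
  | cons c t =>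
    rw [bsGo]
    rw [dif_pos (by simp)]
    rw [if_neg (by rintro ⟨-, h⟩; exact h rfl)]
    have hget : (c :: t)[0] = c := rfl
    have hdrop : (c :: t).drop 1 = t := rfl
    by_cases hbr : c = '['
    · subst hbr
      rw [if_pos hget]
      rw [bsGo_spec _ t.length 1 _ (by omega) (by simp) (by simp)]
      rw [hdrop, repBr_br]
      rw [if_neg (by simp [List.isPrefixOf])]
      rw [repAt_ne _ _ (by simp), repAt_ne _ _ (by simp)]
      rw [comp]
      simp
    · rw [if_neg (by rw [hget]; exact hbr)]
      rw [hget]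
      rw [bsGo_spec _ t.length 1 _ (by omega) (by simp) (by simp)]
      rw [hdrop, repBr_ne _ _ hbr]
      by_cases hat : c = '@' ∧ t.head? = some 'p'
      · obtain ⟨ha, hp⟩ := hat
        subst ha
        cases t with
        | nil => simp at hp
        | cons d t' =>
          simp at hp; subst hp
          rw [repBr_ne _ _ (by decide)]
          rw [if_pos (by simp [List.isPrefixOf])]
          rw [specA_ne 'p' t' (by simp) (by decide)]
          simp only [List.drop_succ_cons, List.drop_zero]
          rw [comp]
          simp
      · have hhd : ¬ (c = '@' ∧ (repBr t).head? = some 'p') := by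
          rw [repBr_head?]; exact hat
        rw [if_neg (pre_ne _ _ hhd)]
        rw [repAt_ne _ _ hhd]
        rw [comp]
        simp

-- ===== VERDICT (by name: the statement is the Claim_ definition above) =====
theorem byte_stuffing_spec : Claim_equal_byte_stuffing := by
  intro data _
  unfold Spec_byte_stuffing byte_stuffing byte_stuffing_alt
  apply String.toList_inj.mp
  simp only [PySem.Str.replace, PySem.Str.startswith, PySem.Str.slice, PySem.Chars.startswith,
    String.toList_ofList]
  rw [show ("[" : String).toList = ['['] from rfl,
      show ("[[" : String).toList = ['[', '['] from rfl,
      show ("@p" : String).toList = ['@', 'p'] from rfl,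
      show ("[p" : String).toList = ['[', 'p'] from rfl]
  rw [replaceBr]
  rw [main_list]
  by_cases hpre : List.isPrefixOf ['@','p'] (repBr data.toList) = true
  · rw [if_pos hpre, if_pos hpre]
    rw [String.toList_append, String.toList_ofList]
    rw [show PySem.Chars.slice (repBr data.toList) (some 2) none = (repBr data.toList).drop 2 from by
      rw [PySem.Chars.slice_eq_listSlice]
      simpa using PySem.List.slice_from (xs := repBr data.toList) (a := 2) (by norm_num)]
    rw [replaceAt]
    simp
  · rw [if_neg hpre, if_neg hpre]
    rw [String.toList_ofList, replaceAt]
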